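-- pv_equiv track=rewrite | github.com/Amborsia/jungle_algorithm | week02/cdhcsh/14659(한조서열정리).py | solve
-- ===== SOURCE A (Python) =====
-- def solve(n:int,data:list[int])->int:
--     answer = 0
--     p = 0
--     for i in range(1,n):
--         if data[p] < data[i]:
--             answer = max(answer,i-p-1)
--             p = i
--     answer = max(answer,n-p-1)
--     return answer
-- ===== SOURCE B (Python) =====
-- def solve(n: int, data: list[int]) -> int:
--     if n <= 1:
--         return 0
--     xs = data[:n]
--     # Sort indices by height, tallest first; stability keeps equal heights in
--     # left-to-right order.  Sweeping that order with a running minimum index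
--     # yields exactly the "record" positions (strict prefix maxima), discovered
--     # right-to-left (tallest record last in the array comes first).
--     order = sorted(range(len(xs)), key=lambda i: -xs[i])
--     recs = []
--     minidx = len(xs)
--     for i in order:
--         if i < minidx:
--             recs.append(i)
--             minidx = i
--     # recs is strictly decreasing; the answer is the largest gap between
--     # consecutive records (minus one), including the tail gap up to n.
--     ans = 0
--     prev = len(xs)
--     for i in recs:
--         ans = max(ans, prev - i - 1)
--         prev = i
--     return ans
-- ===== Notes on version B (the rewrite author's own statement) =====
-- stated objective: alternative
-- what changed: Replaces A's left-to-right greedy reference scan by a sort-based algorithm: sort the indices by height (tallest first, relying on sort stability for equal heights), sweep that order with a running minimum index to extract the record positions right-to-left, then fold the gaps between consecutive records.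
-- outside the precondition, e.g. on solve(3, [5]): A raises IndexError, B returns 0
import Mathlib
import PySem

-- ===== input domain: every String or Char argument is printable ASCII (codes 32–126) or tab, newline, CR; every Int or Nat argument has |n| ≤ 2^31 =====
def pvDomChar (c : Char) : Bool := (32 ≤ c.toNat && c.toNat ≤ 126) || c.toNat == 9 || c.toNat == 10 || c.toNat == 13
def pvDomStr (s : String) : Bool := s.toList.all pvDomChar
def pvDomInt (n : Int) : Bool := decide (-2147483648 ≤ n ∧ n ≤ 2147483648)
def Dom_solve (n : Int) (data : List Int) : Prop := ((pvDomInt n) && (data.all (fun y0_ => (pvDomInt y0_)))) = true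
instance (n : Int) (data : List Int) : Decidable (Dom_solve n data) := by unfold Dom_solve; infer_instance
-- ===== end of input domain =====

-- B replaces A's left-to-right greedy scan by a sort-based algorithm: sort the indices
-- by height (tallest first, stable), sweep them with a running minimum index to find the
-- record positions, then fold the gaps; equivalence is about the return value only.

-- ===== PORT A =====
def solve (n : Int) (data : List Int) : Int :=
  let st := (PySem.List.pyRange 1 n 1).foldl
    (fun (st : Int × Int) i =>
      if PySem.List.pyGetD data st.2 0 < PySem.List.pyGetD data i 0 then
        (max st.1 (i - st.2 - 1), i)
      else st) (0, 0)
  max st.1 (n - st.2 - 1)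

-- ===== PORT B =====
def solve_alt (n : Int) (data : List Int) : Int :=
  if n ≤ 1 then 0
  else
    let xs := PySem.List.slice data none (some n)
    let order := PySem.List.sorted (PySem.List.pyRange 0 (xs.length : Int) 1)
      (fun i => -(PySem.List.pyGetD xs i 0)) false
    let st := order.foldl
      (fun (st : List Int × Int) i =>
        if i < st.2 then (st.1 ++ [i], i) else st) ([], (xs.length : Int))
    let fin := st.1.foldl
      (fun (ap : Int × Int) i => (max ap.1 (ap.2 - i - 1), i)) (0, (xs.length : Int))
    fin.1

-- ===== PRECONDITION & SPEC =====
-- Pre_ excludes exactly the inputs where A raises IndexError: 2 ≤ n but fewer than n elements.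
def Pre_solve (n : Int) (data : List Int) : Prop := n ≤ 1 ∨ n ≤ (data.length : Int)
instance (n : Int) (data : List Int) : Decidable (Pre_solve n data) := by unfold Pre_solve; infer_instance
def pvWitness_solve : Int × List Int := (4, [3, 1, 2, 5])

def Spec_solve (n : Int) (data : List Int) (out : Int) : Prop := out = solve_alt n data
instance (n : Int) (data : List Int) (out : Int) : Decidable (Spec_solve n data out) := by unfold Spec_solve; infer_instance

-- ===== CLAIM (what is proved, stated in full; the proofs are below) =====
def Claim_equal_solve : Prop := ∀ (n : Int) (data : List Int), Dom_solve n data → Pre_solve n data → Spec_solve n data (solve n data)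

-- ===== LEMMAS AND PROOFS =====

-- x is a record position of xs (a strict prefix maximum, as A's greedy scan selects them)
def IsRec (xs : List Int) (x : Int) : Prop :=
  0 ≤ x ∧ x < (xs.length : Int) ∧
    ∀ j : Int, 0 ≤ j → j < x → PySem.List.pyGetD xs j 0 < PySem.List.pyGetD xs x 0

-- proof-side max-of-adjacent-gaps accumulator
def gaps : List Int → Int → Int
  | [], acc => acc
  | [_], acc => acc
  | a :: b :: rest, acc => gaps (b :: rest) (max acc (b - a - 1))

lemma gaps_snoc (l : List Int) (a q acc : Int) :
    gaps (l ++ [a] ++ [q]) acc = max (gaps (l ++ [a]) acc) (q - a - 1) := by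
  induction l generalizing acc with
  | nil => simp [gaps]
  | cons x t ih =>
    cases t with
    | nil => simp [gaps, max_assoc]
    | cons y rest =>
      simp only [List.cons_append, gaps]
      exact ih _

lemma gaps_max (l : List Int) (a c : Int) :
    gaps l (max a c) = max (gaps l a) c := by
  induction l generalizing a with
  | nil => simp [gaps]
  | cons x t ih =>
    cases t with
    | nil => simp [gaps]
    | cons y rest =>
      simp only [gaps]
      rw [max_right_comm, ih]

-- A-side loop invariant: A's fold computes the gaps over the (increasing) record list,
-- keeps the last record p with its height as running max, and the records of the prefix
-- are exactly the IsRec positions ≤ k.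
lemma loop_inv (data xs : List Int) (k : Nat) (hk : (k : Int) < (xs.length : Int))
    (heq : ∀ j : Int, 0 ≤ j → j ≤ (k : Int) →
      PySem.List.pyGetD data j 0 = PySem.List.pyGetD xs j 0) :
    ∃ (l : List Int) (p answer : Int),
      (PySem.List.pyRange 1 (1 + (k : Int)) 1).foldl
        (fun (st : Int × Int) i =>
          if PySem.List.pyGetD data st.2 0 < PySem.List.pyGetD data i 0 then
            (max st.1 (i - st.2 - 1), i)
          else st) (0, 0) = (answer, p) ∧
      0 ≤ p ∧ p ≤ (k : Int) ∧ gaps (l ++ [p]) 0 = answer ∧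
      (l ++ [p]).Pairwise (· < ·) ∧
      (∀ j : Int, 0 ≤ j → j ≤ (k : Int) → PySem.List.pyGetD xs j 0 ≤ PySem.List.pyGetD xs p 0) ∧
      (∀ x : Int, x ∈ l ++ [p] ↔ (0 ≤ x ∧ x ≤ (k : Int) ∧ IsRec xs x)) := by
  induction k with
  | zero =>
    refine ⟨[], 0, 0, ?_, le_refl 0, le_refl 0, by simp [gaps], by simp, ?_, ?_⟩
    · rw [PySem.List.pyRange_one_eq_nil (by norm_num)]; rfl
    · intro j hj0 hjk
      have : j = 0 := le_antisymm hjk hj0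
      simp [this]
    · intro x
      simp only [List.nil_append, List.mem_singleton]
      constructor
      · rintro rfl
        exact ⟨le_refl 0, le_refl 0, le_refl 0, by push_cast at hk ⊢; omega,
          fun j hj0 hj => absurd hj (by omega)⟩
      · rintro ⟨h0, hk, _⟩; omega
  | succ k ih =>
    have hk' : (k : Int) < (xs.length : Int) := by push_cast at hk ⊢; omega
    obtain ⟨l, p, answer, hA, hp0, hpk, hg, hpw, hmax, hmem⟩ :=
      ih hk' (fun j hj0 hjk => heq j hj0 (by push_cast at hjk ⊢; omega))
    have hsplit : PySem.List.pyRange 1 (1 + ((k + 1 : Nat) : Int)) 1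
        = PySem.List.pyRange 1 (1 + (k : Int)) 1 ++ [1 + (k : Int)] := by
      have : (1 + ((k + 1 : Nat) : Int)) = (1 + (k : Int)) + 1 := by push_cast; ring
      rw [this, PySem.List.pyRange_one_succ_right (by omega)]
    rw [hsplit, List.foldl_append, hA, List.foldl_cons, List.foldl_nil]
    set i : Int := 1 + (k : Int) with hidef
    have hdp : PySem.List.pyGetD data p 0 = PySem.List.pyGetD xs p 0 :=
      heq p hp0 (by push_cast; omega)
    have hdi : PySem.List.pyGetD data i 0 = PySem.List.pyGetD xs i 0 :=
      heq i (by omega) (by push_cast; omega)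
    simp only [hdp, hdi]
    by_cases hc : PySem.List.pyGetD xs p 0 < PySem.List.pyGetD xs i 0
    · refine ⟨l ++ [p], i, max answer (i - p - 1), by simp [hc], by omega, by push_cast; omega,
        ?_, ?_, ?_, ?_⟩
      · rw [gaps_snoc, hg]
      · rw [List.pairwise_append]
        refine ⟨hpw, by simp, ?_⟩
        intro a ha b hb
        simp only [List.mem_singleton] at hb
        subst hb
        have := (hmem a).mp ha
        omega
      · intro j hj0 hjk
        by_cases hji : j ≤ (k : Int)
        · exact le_of_lt (lt_of_le_of_lt (hmax j hj0 hji) hc)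
        · have : j = i := by push_cast at hjk; omega
          simp [this]
      · intro x
        rw [List.mem_append, hmem x]
        simp only [List.mem_singleton]
        constructor
        · rintro (⟨h0, hxk, hr⟩ | rfl)
          · exact ⟨h0, by push_cast; omega, hr⟩
          · refine ⟨by omega, by push_cast; omega, by omega, by push_cast at hk ⊢; omega, ?_⟩
            intro j hj0 hji
            exact lt_of_le_of_lt (hmax j hj0 (by omega)) hc
        · rintro ⟨h0, hxk, hr⟩
          by_cases hxk' : x ≤ (k : Int)
          · exact Or.inl ⟨h0, hxk', hr⟩
          · right; push_cast at hxk; omega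
    · refine ⟨l, p, answer, by simp [hc], hp0, by push_cast; omega, hg, hpw, ?_, ?_⟩
      · intro j hj0 hjk
        by_cases hji : j ≤ (k : Int)
        · exact hmax j hj0 hji
        · have : j = i := by push_cast at hjk; omega
          rw [this]; omega
      · intro x
        rw [hmem]
        constructor
        · rintro ⟨h0, hxk, hr⟩
          exact ⟨h0, by push_cast; omega, hr⟩
        · rintro ⟨h0, hxk, hr⟩
          refine ⟨h0, ?_, hr⟩
          by_contra hgt
          have hx : x = i := by push_cast at hxk; omega
          have h2 := hr.2.2 p hp0 (by omega)
          rw [hx] at h2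
          exact hc h2

-- ---- B-side: the stable insertion sort keeps the indices lexicographically ordered
-- by (key, original position) since each new index is larger than all previous ones.

-- strict lexicographic order on (key value, index)
def LexLt (xs : List Int) (a b : Int) : Prop :=
  -(PySem.List.pyGetD xs a 0) < -(PySem.List.pyGetD xs b 0) ∨
    (-(PySem.List.pyGetD xs a 0) = -(PySem.List.pyGetD xs b 0) ∧ a < b)

lemma insertBy_pairwise_lex (xs : List Int) (x : Int) (acc : List Int)
    (hpw : acc.Pairwise (LexLt xs)) (hlt : ∀ a ∈ acc, a < x) :
    (PySem.List.insertBy (fun a b => decide (-(PySem.List.pyGetD xs a 0) < -(PySem.List.pyGetD xs b 0))) x acc).Pairwise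
      (LexLt xs) := by
  induction acc with
  | nil => simp [PySem.List.insertBy]
  | cons y ys ih =>
    simp only [PySem.List.insertBy]
    by_cases hb : -(PySem.List.pyGetD xs x 0) < -(PySem.List.pyGetD xs y 0)
    · rw [if_pos (by simpa using hb)]
      rw [List.pairwise_cons]
      refine ⟨?_, hpw⟩
      intro z hz
      rcases List.mem_cons.mp hz with rfl | hz'
      · exact Or.inl hb
      · have hyz := (List.pairwise_cons.mp hpw).1 z hz'
        left
        rcases hyz with h | ⟨h, _⟩
        · exact lt_of_lt_of_le hb (le_of_lt h)
        · rw [← h]; exact hb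
    · rw [if_neg (by simpa using hb)]
      rw [List.pairwise_cons]
      refine ⟨?_, ih (List.pairwise_cons.mp hpw).2 (fun a ha => hlt a (List.mem_cons_of_mem y ha))⟩
      intro z hz
      rcases (PySem.List.mem_insertBy _ x z ys).mp hz with rfl | hz'
      · by_cases hyx : -(PySem.List.pyGetD xs y 0) < -(PySem.List.pyGetD xs z 0)
        · exact Or.inl hyx
        · exact Or.inr ⟨by omega, hlt y List.mem_cons_self⟩
      · exact (List.pairwise_cons.mp hpw).1 z hz'

-- folding insertions of 0,1,…,mn-1 keeps the accumulator pairwise LexLt and bounded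
lemma foldl_insertBy_inv (xs : List Int) (mn : Nat) (acc : List Int)
    (hpw : acc.Pairwise (LexLt xs)) (hub : ∀ a ∈ acc, a < 0) :
    ((PySem.List.pyRange 0 (mn : Int) 1).foldl
      (fun acc x => PySem.List.insertBy (fun a b =>
        decide (-(PySem.List.pyGetD xs a 0) < -(PySem.List.pyGetD xs b 0))) x acc) acc).Pairwise (LexLt xs)
    ∧ ∀ a ∈ ((PySem.List.pyRange 0 (mn : Int) 1).foldl
      (fun acc x => PySem.List.insertBy (fun a b =>
        decide (-(PySem.List.pyGetD xs a 0) < -(PySem.List.pyGetD xs b 0))) x acc) acc), a < (mn : Int) := by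
  induction mn with
  | zero =>
    rw [PySem.List.pyRange_one_eq_nil (by norm_num)]
    exact ⟨hpw, fun a ha => hub a ha⟩
  | succ k ih =>
    obtain ⟨hpw', hub'⟩ := ih
    have hsplit : PySem.List.pyRange 0 ((k + 1 : Nat) : Int) 1
        = PySem.List.pyRange 0 (k : Int) 1 ++ [(k : Int)] := by
      have : (((k + 1 : Nat)) : Int) = (k : Int) + 1 := by push_cast; ring
      rw [this, PySem.List.pyRange_one_succ_right (by positivity)]
    rw [hsplit, List.foldl_append, List.foldl_cons, List.foldl_nil]
    constructor
    · exact insertBy_pairwise_lex xs _ _ hpw' hub'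
    · intro a ha
      rcases (PySem.List.mem_insertBy _ _ a _).mp ha with rfl | ha'
      · push_cast; omega
      · have := hub' a ha'
        push_cast
        omega

-- the sorted index list is pairwise LexLt
lemma sorted_lex (xs : List Int) (m : Int) :
    (PySem.List.sorted (PySem.List.pyRange 0 m 1)
      (fun i => -(PySem.List.pyGetD xs i 0)) false).Pairwise (LexLt xs) := by
  rw [PySem.List.sorted_eq_foldl_insertBy]
  by_cases hm : 0 ≤ m
  · obtain ⟨mn, rfl⟩ : ∃ mn : Nat, m = (mn : Int) := ⟨m.toNat, by omega⟩
    exact (foldl_insertBy_inv xs mn [] List.Pairwise.nil (by simp)).1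
  · rw [PySem.List.pyRange_one_eq_nil (by omega)]
    exact List.Pairwise.nil

-- the survivor sweep over a list
def surv : List Int → Int → List Int
  | [], _ => []
  | i :: t, M => if i < M then i :: surv t i else surv t M

lemma surv_subset (L : List Int) (M x : Int) (hx : x ∈ surv L M) : x ∈ L := by
  induction L generalizing M with
  | nil => simp [surv] at hx
  | cons i t ih =>
    simp only [surv] at hx
    by_cases hc : i < M
    · rw [if_pos hc] at hx
      rcases List.mem_cons.mp hx with rfl | hx'
      · exact List.mem_cons_self
      · exact List.mem_cons_of_mem i (ih _ hx')
    · rw [if_neg hc] at hx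
      exact List.mem_cons_of_mem i (ih _ hx)

lemma surv_lt (L : List Int) (M x : Int) (hx : x ∈ surv L M) : x < M := by
  induction L generalizing M with
  | nil => simp [surv] at hx
  | cons i t ih =>
    simp only [surv] at hx
    by_cases hc : i < M
    · rw [if_pos hc] at hx
      rcases List.mem_cons.mp hx with rfl | hx'
      · exact hc
      · exact lt_trans (ih _ hx') hc
    · rw [if_neg hc] at hx
      exact ih _ hx

lemma surv_pairwise_gt (L : List Int) (M : Int) : (surv L M).Pairwise (· > ·) := by
  induction L generalizing M with
  | nil => exact List.Pairwise.nil
  | cons i t ih =>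
    simp only [surv]
    by_cases hc : i < M
    · rw [if_pos hc, List.pairwise_cons]
      exact ⟨fun x hx => surv_lt t i x hx, ih i⟩
    · rw [if_neg hc]; exact ih M

-- full membership characterisation of the sweep on a duplicate-free list
lemma mem_surv_iff (L : List Int) (M x : Int) (hnd : L.Nodup) :
    x ∈ surv L M ↔ x < M ∧ ∃ pre suf, L = pre ++ x :: suf ∧ ∀ y ∈ pre, x < y := by
  induction L generalizing M with
  | nil =>
    simp only [surv, List.not_mem_nil, false_iff, not_and]
    rintro _ ⟨pre, suf, h, _⟩
    exact absurd h (by simp)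
  | cons i t ih =>
    have hnd' : t.Nodup := (List.nodup_cons.mp hnd).2
    have hit : i ∉ t := (List.nodup_cons.mp hnd).1
    by_cases hx : x = i
    · subst hx
      simp only [surv]
      by_cases hc : x < M
      · rw [if_pos hc]
        simp only [List.mem_cons, true_or, true_iff]
        exact ⟨hc, [], t, rfl, by simp⟩
      · rw [if_neg hc]
        constructor
        · intro h; exact absurd (surv_subset t M x h) hit
        · rintro ⟨hxM, _⟩; exact absurd hxM hc
    · simp only [surv]
      by_cases hc : i < M
      · rw [if_pos hc]
        rw [List.mem_cons, or_iff_right hx, ih _ hnd']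
        constructor
        · rintro ⟨hxi, pre, suf, rfl, hpre⟩
          refine ⟨by omega, i :: pre, suf, rfl, ?_⟩
          intro y hy
          rcases List.mem_cons.mp hy with rfl | hy'
          · exact hxi
          · exact hpre y hy'
        · rintro ⟨hxM, pre, suf, heq, hpre⟩
          cases pre with
          | nil => simp at heq; exact absurd heq.1.symm hx
          | cons a pre' =>
            simp only [List.cons_append, List.cons.injEq] at heq
            obtain ⟨rfl, heq'⟩ := heq
            have hxi := hpre i List.mem_cons_self
            exact ⟨hxi, pre', suf, heq', fun y hy => hpre y (List.mem_cons_of_mem i hy)⟩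
      · rw [if_neg hc]
        rw [ih _ hnd']
        constructor
        · rintro ⟨hxi, pre, suf, rfl, hpre⟩
          refine ⟨by omega, i :: pre, suf, rfl, ?_⟩
          intro y hy
          rcases List.mem_cons.mp hy with rfl | hy'
          · omega
          · exact hpre y hy'
        · rintro ⟨hxM, pre, suf, heq, hpre⟩
          cases pre with
          | nil => simp at heq; exact absurd heq.1.symm hx
          | cons a pre' =>
            simp only [List.cons_append, List.cons.injEq] at heq
            obtain ⟨rfl, heq'⟩ := heq
            have hxi := hpre i List.mem_cons_self
            exact ⟨by omega, pre', suf, heq', fun y hy => hpre y (List.mem_cons_of_mem i hy)⟩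

-- B's first fold is the sweep
lemma fold_eq_surv (L : List Int) (acc : List Int) (M : Int) :
    L.foldl (fun (st : List Int × Int) i =>
      if i < st.2 then (st.1 ++ [i], i) else st) (acc, M)
      = (acc ++ surv L M, (surv L M).getLast?.getD M) := by
  induction L generalizing acc M with
  | nil => simp [surv]
  | cons i t ih =>
    simp only [surv, List.foldl_cons]
    by_cases hc : i < M
    · rw [if_pos hc, if_pos hc, ih]
      cases hs : surv t i with
      | nil => simp
      | cons a u =>
        simp only [List.append_assoc, List.singleton_append, Prod.mk.injEq, true_and]
        cases h2 : (a :: u).getLast? with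
        | none => rw [List.getLast?_eq_none_iff] at h2; exact absurd h2 (by simp)
        | some b => rw [List.getLast?_cons_cons, h2]; rfl
    · rw [if_neg hc, if_neg hc, ih]

-- membership in the sweep over the sorted index list = being a record
lemma mem_surv_sorted (xs : List Int) (m : Int) (hm : m = (xs.length : Int)) (x : Int) :
    x ∈ surv (PySem.List.sorted (PySem.List.pyRange 0 m 1)
      (fun i => -(PySem.List.pyGetD xs i 0)) false) m ↔ IsRec xs x := by
  set S := PySem.List.sorted (PySem.List.pyRange 0 m 1)
      (fun i => -(PySem.List.pyGetD xs i 0)) false with hS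
  have hperm : S.Perm (PySem.List.pyRange 0 m 1) := PySem.List.sorted_perm _ _ _
  have hndS : S.Nodup := hperm.nodup_iff.mpr (PySem.List.nodup_pyRange_one 0 m)
  have hmemS : ∀ y, y ∈ S ↔ (0 ≤ y ∧ y < m) := by
    intro y
    rw [hperm.mem_iff, PySem.List.mem_pyRange_one]
  have hlex : S.Pairwise (LexLt xs) := sorted_lex xs m
  rw [mem_surv_iff _ _ _ hndS]
  constructor
  · rintro ⟨hxm, pre, suf, hsplit, hpre⟩
    have hxS : x ∈ S := by rw [hsplit]; simp
    have hx0 : 0 ≤ x := ((hmemS x).mp hxS).1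
    refine ⟨hx0, by omega, ?_⟩
    intro j hj0 hjx
    have hjS : j ∈ S := (hmemS j).mpr ⟨hj0, by omega⟩
    rw [hsplit] at hjS hlex
    rcases List.mem_append.mp hjS with hjpre | hjsuf
    · exact absurd (hpre j hjpre) (by omega)
    · rcases List.mem_cons.mp hjsuf with rfl | hjsuf'
      · omega
      · have := (List.pairwise_append.mp hlex).2.2
        have hxj : LexLt xs x j := by
          have h2 := (List.pairwise_cons.mp (List.pairwise_append.mp hlex).2.1).1
          exact h2 j hjsuf'
        rcases hxj with h | ⟨_, h⟩
        · omega
        · omega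
  · rintro ⟨hx0, hxm, hr⟩
    have hxS : x ∈ S := (hmemS x).mpr ⟨hx0, by omega⟩
    obtain ⟨pre, suf, hsplit⟩ := List.append_of_mem hxS
    refine ⟨by omega, pre, suf, hsplit, ?_⟩
    intro y hy
    have hyS : y ∈ S := by rw [hsplit]; simp [hy]
    have hy0 : 0 ≤ y := ((hmemS y).mp hyS).1
    have hym : y < m := ((hmemS y).mp hyS).2
    have hxpre : x ∉ pre := by
      rw [hsplit] at hndS
      have := (List.nodup_append.mp hndS).2.2
      intro hxp
      exact this x hxp x List.mem_cons_self rfl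
    have hyx : y ≠ x := fun h => hxpre (h ▸ hy)
    rw [hsplit] at hlex
    have hlyx : LexLt xs y x := (List.pairwise_append.mp hlex).2.2 y hy x List.mem_cons_self
    by_contra hge
    have hylt : y < x := by omega
    have := hr y hy0 hylt
    rcases hlyx with h | ⟨h, _⟩
    · omega
    · omega

-- B's second fold computes gaps over the reversed record list
lemma revfold (Rr : List Int) (acc prev : Int) :
    ∃ q, Rr.foldl (fun (ap : Int × Int) i => (max ap.1 (ap.2 - i - 1), i)) (acc, prev)
      = (gaps (Rr.reverse ++ [prev]) acc, q) := by
  induction Rr generalizing acc prev with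
  | nil => exact ⟨prev, by simp [gaps]⟩
  | cons r t ih =>
    obtain ⟨q, hq⟩ := ih (max acc (prev - r - 1)) r
    refine ⟨q, ?_⟩
    simp only [List.foldl_cons, hq, List.reverse_cons]
    congr 1
    rw [gaps_max, gaps_snoc]

-- two strictly-decreasing lists with the same members are equal
lemma eq_of_pairwise_gt_of_mem (l₁ l₂ : List Int)
    (h₁ : l₁.Pairwise (· > ·)) (h₂ : l₂.Pairwise (· > ·))
    (hmem : ∀ x, x ∈ l₁ ↔ x ∈ l₂) : l₁ = l₂ := by
  have hnd₁ : l₁.Nodup := h₁.imp (fun h => ne_of_gt h)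
  have hnd₂ : l₂.Nodup := h₂.imp (fun h => ne_of_gt h)
  have hperm : l₁.Perm l₂ := (List.perm_ext_iff_of_nodup hnd₁ hnd₂).mpr hmem
  exact List.Perm.eq_of_pairwise (fun a b _ _ h1 h2 => absurd h1 (lt_asymm h2)) h₁ h₂ hperm

-- ===== VERDICT (by name: the statement is the Claim_ definition above) =====
theorem solve_spec : Claim_equal_solve := by
  intro n data _ hpre
  unfold Spec_solve
  simp only [solve, solve_alt]
  by_cases hn1 : n ≤ 1
  · rw [if_pos hn1, PySem.List.pyRange_one_eq_nil (by omega)]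
    simp only [List.foldl_nil]
    omega
  · rw [if_neg hn1]
    have hnlen : n ≤ (data.length : Int) := by
      rcases hpre with h | h
      · omega
      · exact h
    have hxs : PySem.List.slice data none (some n) = data.take n.toNat :=
      PySem.List.slice_to data (by omega)
    have hlen : ((PySem.List.slice data none (some n)).length : Int) = n := by
      rw [hxs, List.length_take]; omega
    set xs := PySem.List.slice data none (some n) with hxsdef
    have heq : ∀ j : Int, 0 ≤ j → j ≤ ((n - 1).toNat : Int) →
        PySem.List.pyGetD data j 0 = PySem.List.pyGetD xs j 0 := by
      intro j hj0 hjk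
      have hjn : j < n := by omega
      obtain ⟨mj, rfl⟩ : ∃ mj : Nat, j = (mj : Int) := ⟨j.toNat, by omega⟩
      rw [PySem.List.pyGetD_natCast, PySem.List.pyGetD_natCast, hxs]
      rw [List.getD_eq_getElem?_getD, List.getD_eq_getElem?_getD,
        List.getElem?_take_of_lt (by omega)]
    have hk : (((n - 1).toNat : Nat) : Int) < (xs.length : Int) := by rw [hlen]; omega
    obtain ⟨l, p, answer, hA, hp0, hpk, hg, hpw, hmax, hmem⟩ :=
      loop_inv data xs (n - 1).toNat hk heq
    have hone : 1 + (((n - 1).toNat : Nat) : Int) = n := by omega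
    rw [hone] at hA
    rw [hA]
    -- B side
    rw [fold_eq_surv]
    set S := PySem.List.sorted (PySem.List.pyRange 0 (xs.length : Int) 1)
      (fun i => -(PySem.List.pyGetD xs i 0)) false with hSdef
    have hsurv : surv S (xs.length : Int) = (l ++ [p]).reverse := by
      apply eq_of_pairwise_gt_of_mem
      · exact surv_pairwise_gt _ _
      · exact List.pairwise_reverse.mpr hpw
      · intro x
        rw [List.mem_reverse, hmem x]
        rw [mem_surv_sorted xs (xs.length : Int) rfl x]
        constructor
        · intro hr
          refine ⟨hr.1, ?_, hr⟩
          have := hr.2.1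
          rw [hlen] at this
          omega
        · rintro ⟨_, _, hr⟩
          exact hr
    obtain ⟨q, hq⟩ := revfold (surv S (xs.length : Int)) 0 (xs.length : Int)
    rw [List.nil_append, hq]
    rw [hsurv, List.reverse_reverse, hlen]
    rw [gaps_snoc, hg]
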